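-- pv_equiv track=rewrite | github.com/osava-nsit/osava | algos/disk_scheduling.py | first_come_first_serve
-- ===== SOURCE A (Python) =====
-- def first_come_first_serve(curr_head_pos, disk_queue):
--     total_head_movements = 0 # To keep track of the total number of read/write head movements
--     memory_state = [] # To keep track of the order in which cylinders are visited
--     memory_state.append(str(curr_head_pos))
--
--     for cylinder in disk_queue:
--         memory_state.append(cylinder)
--         difference = abs(int(cylinder) - curr_head_pos)
--         total_head_movements += difference
--         curr_head_pos = int(cylinder)
--
--     status = (memory_state, total_head_movements);
--     return status
-- ===== SOURCE B (Python) =====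
-- def first_come_first_serve(curr_head_pos, disk_queue):
--     disk_queue = list(disk_queue)
--     positions = [curr_head_pos] + [int(c) for c in disk_queue]
--
--     def sweep(lo, hi):
--         # total head movement over positions[lo..hi], by divide and conquer:
--         # split the index interval at its midpoint and add both halves.
--         if hi - lo < 1:
--             return 0
--         if hi - lo == 1:
--             return abs(positions[hi] - positions[lo])
--         mid = (lo + hi) // 2
--         return sweep(lo, mid) + sweep(mid, hi)
--
--     return ([str(curr_head_pos)] + disk_queue, sweep(0, len(positions) - 1))
-- ===== Notes on version B (the rewrite author's own statement) =====
-- stated objective: alternative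
-- what changed: B replaces A's linear accumulator loop (running head position + running total) by a divide-and-conquer recursion over the index interval of the materialized position array: the interval is split at its midpoint and the two halves' movements are added, correct because the pairwise-distance sum is interval-additive at any split point.
import Mathlib
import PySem

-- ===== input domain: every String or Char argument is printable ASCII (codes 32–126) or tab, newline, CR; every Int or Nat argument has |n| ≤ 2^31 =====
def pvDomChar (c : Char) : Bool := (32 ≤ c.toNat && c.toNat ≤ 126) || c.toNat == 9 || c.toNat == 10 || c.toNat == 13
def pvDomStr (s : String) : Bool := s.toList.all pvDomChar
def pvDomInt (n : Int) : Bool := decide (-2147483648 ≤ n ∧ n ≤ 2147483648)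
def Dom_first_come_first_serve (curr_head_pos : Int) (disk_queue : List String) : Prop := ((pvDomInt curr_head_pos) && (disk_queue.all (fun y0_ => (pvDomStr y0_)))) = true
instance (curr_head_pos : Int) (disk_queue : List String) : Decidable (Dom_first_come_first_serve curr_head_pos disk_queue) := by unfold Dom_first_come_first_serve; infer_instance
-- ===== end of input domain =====

-- B replaces A's accumulator loop by a divide-and-conquer sweep over the index
-- interval of the materialized position array; alternative decomposition, same cost.


-- int(cylinder); Pre_ guarantees the Option is some, so getD 0 never fires inside Pre_
def pvParse (c : String) : Int := (PySem.Int.ofStr? c).getD 0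

-- ===== PORT A =====
def first_come_first_serve (curr_head_pos : Int) (disk_queue : List String) : List String × Int :=
  let st := disk_queue.foldl
    (fun (st : List String × Int × Int) cylinder =>
      (st.1 ++ [cylinder], st.2.1 + |pvParse cylinder - st.2.2|, pvParse cylinder))
    ([PySem.Int.toStr curr_head_pos], 0, curr_head_pos)
  (st.1, st.2.1)

-- ===== PORT B =====
-- divide-and-conquer sweep over the index interval [lo, hi] of positions
def pvSweep (p : List Int) (lo hi : Nat) : Int :=
  if hi - lo < 1 then 0
  else if hi - lo = 1 then |p.getD hi 0 - p.getD lo 0|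
  else pvSweep p lo ((lo + hi) / 2) + pvSweep p ((lo + hi) / 2) hi
termination_by hi - lo
decreasing_by all_goals omega

def first_come_first_serve_alt (curr_head_pos : Int) (disk_queue : List String) : List String × Int :=
  let positions := curr_head_pos :: disk_queue.map pvParse
  (PySem.Int.toStr curr_head_pos :: disk_queue, pvSweep positions 0 (positions.length - 1))

-- ===== PRECONDITION & SPEC =====
-- Pre_: every queue entry parses as a Python int (otherwise A raises ValueError on int(cylinder))
def Pre_first_come_first_serve (curr_head_pos : Int) (disk_queue : List String) : Prop :=
  disk_queue.all (fun c => (PySem.Int.ofStr? c).isSome) = true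
instance (curr_head_pos : Int) (disk_queue : List String) : Decidable (Pre_first_come_first_serve curr_head_pos disk_queue) := by unfold Pre_first_come_first_serve; infer_instance
def pvWitness_first_come_first_serve : Int × List String := (53, ["98", "183", "37"])

def Spec_first_come_first_serve (curr_head_pos : Int) (disk_queue : List String) (out : List String × Int) : Prop := out = first_come_first_serve_alt curr_head_pos disk_queue
instance (curr_head_pos : Int) (disk_queue : List String) (out : List String × Int) : Decidable (Spec_first_come_first_serve curr_head_pos disk_queue out) := by unfold Spec_first_come_first_serve; infer_instance

-- ===== CLAIM =====
def Claim_equal_first_come_first_serve : Prop := ∀ (curr_head_pos : Int) (disk_queue : List String), Dom_first_come_first_serve curr_head_pos disk_queue → Pre_first_come_first_serve curr_head_pos disk_queue → Spec_first_come_first_serve curr_head_pos disk_queue (first_come_first_serve curr_head_pos disk_queue)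

-- ===== LEMMAS AND PROOFS =====

-- the sequential pairwise sum of head movements starting from head h
def pairSum (h : Int) : List Int → Int
  | [] => 0
  | x :: t => |x - h| + pairSum x t

-- the index-interval form of the pairwise sum
def adjSum (p : List Int) (lo hi : Nat) : Int :=
  ((List.range' lo (hi - lo)).map (fun i => |p.getD (i + 1) 0 - p.getD i 0|)).sum

theorem sweep_eq_adjSum (p : List Int) (lo hi : Nat) : pvSweep p lo hi = adjSum p lo hi := by
  rw [pvSweep]
  split_ifs with h1 h2
  · simp [adjSum, show hi - lo = 0 by omega]
  · have : hi = lo + 1 := by omega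
    subst this
    simp [adjSum, List.range'_succ]
  · rw [sweep_eq_adjSum p lo ((lo + hi) / 2), sweep_eq_adjSum p ((lo + hi) / 2) hi]
    unfold adjSum
    have hsplit : List.range' lo (hi - lo) =
        List.range' lo (((lo + hi) / 2) - lo) ++
        List.range' ((lo + hi) / 2) (hi - (lo + hi) / 2) := by
      have h3 : lo + (((lo + hi) / 2) - lo) = (lo + hi) / 2 := by omega
      have h4 : (((lo + hi) / 2) - lo) + (hi - (lo + hi) / 2) = hi - lo := by omega
      rw [← h4, ← List.range'_append_1, h3]
    rw [hsplit, List.map_append, List.sum_append]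
termination_by hi - lo
decreasing_by all_goals omega

theorem sum_shift (f g : Nat → Int) (hfg : ∀ i, f (i + 1) = g i) (lo n : Nat) :
    ((List.range' (lo + 1) n).map f).sum = ((List.range' lo n).map g).sum := by
  induction n generalizing lo with
  | zero => simp
  | succ n ih =>
      rw [List.range'_succ, List.range'_succ]
      simp only [List.map_cons, List.sum_cons]
      rw [hfg lo, ih (lo + 1)]

theorem adjSum_eq_pairSum (m : List Int) (h : Int) :
    adjSum (h :: m) 0 m.length = pairSum h m := by
  induction m generalizing h with
  | nil => simp [adjSum, pairSum]
  | cons x t ih =>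
      unfold adjSum pairSum
      simp only [List.length_cons, Nat.sub_zero, List.range'_succ]
      simp only [List.map_cons, List.sum_cons, List.getD_cons_succ, List.getD_cons_zero]
      rw [sum_shift _ (fun i => |(x :: t).getD (i + 1) 0 - (x :: t).getD i 0|)
            (fun i => by simp) 0 t.length]
      rw [← ih x]
      unfold adjSum
      simp

-- the head position carried by A's loop
def pvLast (h : Int) : List Int → Int
  | [] => h
  | x :: t => pvLast x t

theorem pvLoop_eq (q : List String) (ms : List String) (tot h : Int) :
    q.foldl (fun (st : List String × Int × Int) c =>
        (st.1 ++ [c], st.2.1 + |pvParse c - st.2.2|, pvParse c)) (ms, tot, h)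
    = (ms ++ q, tot + pairSum h (q.map pvParse), pvLast h (q.map pvParse)) := by
  induction q generalizing ms tot h with
  | nil => simp [pairSum, pvLast]
  | cons c q ih =>
      simp only [List.foldl_cons, List.map_cons]
      rw [ih]
      simp only [pairSum, pvLast, List.append_assoc, List.singleton_append, add_assoc]

-- ===== VERDICT =====
theorem first_come_first_serve_spec : Claim_equal_first_come_first_serve := by
  intro h q _ _
  unfold Spec_first_come_first_serve first_come_first_serve first_come_first_serve_alt
  rw [pvLoop_eq]
  simp only [List.length_cons, Nat.add_sub_cancel, sweep_eq_adjSum]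
  rw [adjSum_eq_pairSum (q.map pvParse) h]
  refine Prod.ext rfl ?_
  simp
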